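-- pv_equiv track=rewrite | github.com/kukom6/PV248 | 08-statistic/utilities.py | merge_date_columns
-- ===== SOURCE A (Python) =====
-- import copy
--
-- def merge_date_columns(data):
--     result = {}
--     for originalColumn in data:
--         if originalColumn == 'student':
--             result['student'] = copy.deepcopy(data['student'])
--             continue
--         date = originalColumn.split("/")[0]
--         if date not in result.keys():
--             result[date] = copy.deepcopy(data[originalColumn])
--         else:  # date is already in result
--             for index, cell in enumerate(data[originalColumn]):
--                 result[date][index] += cell
--     return result
-- ===== SOURCE B (Python) =====
-- import copy
--
-- def merge_date_columns(data):
--     # Pass 1: group the column keys by their date prefix, in first-appearance order.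
--     groups = {}
--     for key in data:
--         groups.setdefault(key.split("/")[0], []).append(key)
--     # Pass 2: merge each group: the first column is the base, the rest are added elementwise.
--     result = {}
--     for date, keys in groups.items():
--         merged = copy.deepcopy(data[keys[0]])
--         for key in keys[1:]:
--             for index, cell in enumerate(data[key]):
--                 merged[index] += cell
--         result[date] = merged
--     return result
-- ===== Notes on version B (the rewrite author's own statement) =====
-- stated objective: alternative
-- what changed: A merges in a single pass with a membership test per key and in-place accumulation into the result dict; B first builds an ordered index grouping the column keys by their date prefix, then reduces each group independently (deep-copied first column as base, remaining columns added elementwise), assembling the result group by group.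
-- outside the precondition, e.g. on merge_date_columns({'student/1': [1], 'student': [2]}): A returns {'student': [2]}, B returns {'student': [3]}; on merge_date_columns({'a/1': [1], 'a/2': [2, 3]}): A raises IndexError, B raises IndexError
import Mathlib
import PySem

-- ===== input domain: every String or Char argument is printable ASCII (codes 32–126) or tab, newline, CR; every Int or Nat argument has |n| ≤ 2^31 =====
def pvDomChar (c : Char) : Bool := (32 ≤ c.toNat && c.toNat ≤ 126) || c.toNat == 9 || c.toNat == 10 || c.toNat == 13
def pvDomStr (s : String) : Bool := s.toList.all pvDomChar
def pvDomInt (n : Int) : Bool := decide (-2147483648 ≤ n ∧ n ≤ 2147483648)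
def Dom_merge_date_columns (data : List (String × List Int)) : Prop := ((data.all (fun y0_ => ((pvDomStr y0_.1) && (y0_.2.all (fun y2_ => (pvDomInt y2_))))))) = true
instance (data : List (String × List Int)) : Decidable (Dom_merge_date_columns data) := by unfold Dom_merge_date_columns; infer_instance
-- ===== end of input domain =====

-- B restructures the same merge as an explicit two-pass decomposition (build a group index of keys by
-- date prefix, then reduce each group); objective: alternative decomposition, same cost.
-- Equivalence is about the RETURN value; neither program mutates its argument (A deep-copies before it writes).

-- key.split("/")[0]  (split? with the nonempty separator "/" always returns some nonempty list, so [0] is headD)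
def pvTag (k : String) : String := ((PySem.Str.split? k "/").getD []).headD ""

-- ===== PORT A =====
-- A's loop body, abstracted over the lookup dict d (Python's reads of `data[...]`); `data[k]` is
-- d.getD k [] — the key is always present (it comes from iterating data), so KeyError cannot occur.
-- The in-place `result[date][index] += cell` loop is ported as read–modify–write of the entry at
-- `date`; List.set ignores an out-of-range index where Python raises IndexError (excluded by Pre_).
def pvStepA (d : PySem.Dict String (List Int)) (result : PySem.Dict String (List Int))
    (kv : String × List Int) : PySem.Dict String (List Int) :=
  let originalColumn := kv.1
  if originalColumn == "student" then
    result.insert "student" (d.getD "student" [])          -- copy.deepcopy(data['student'])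
  else
    let date := pvTag originalColumn
    if result.contains date then
      -- for index, cell in enumerate(data[originalColumn]): result[date][index] += cell
      result.insert date
        ((PySem.List.enumerate (d.getD originalColumn [])).foldl
          (fun xs ic => xs.set ic.1.toNat (xs.getD ic.1.toNat 0 + ic.2))
          (result.getD date []))
    else
      result.insert date (d.getD originalColumn [])        -- copy.deepcopy(data[originalColumn])

def merge_date_columns (data : List (String × List Int)) : List (String × List Int) :=
  (data.foldl (pvStepA (PySem.Dict.mk data)) PySem.Dict.empty).items

-- ===== PORT B =====
def merge_date_columns_alt (data : List (String × List Int)) : List (String × List Int) :=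
  let d := PySem.Dict.mk data
  -- Pass 1: groups.setdefault(key.split("/")[0], []).append(key)
  let groups : PySem.Dict String (List String) :=
    data.foldl (fun g kv => g.modify (pvTag kv.1) [] (fun ks => ks ++ [kv.1])) PySem.Dict.empty
  -- Pass 2: merged = deepcopy(data[keys[0]]); for key in keys[1:]: for i, cell: merged[i] += cell
  (groups.items.foldl
    (fun result tks =>
      result.insert tks.1
        (tks.2.tail.foldl
          (fun m key =>
            (PySem.List.enumerate (d.getD key [])).foldl
              (fun m ic => m.set ic.1.toNat (m.getD ic.1.toNat 0 + ic.2)) m)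
          (d.getD (tks.2.headD "") [])))
    PySem.Dict.empty).items

-- ===== PRECONDITION & SPEC =====
-- Pre_ excludes (a) inputs where some key with date prefix 'student' precedes the literal key
-- 'student' — there A's special branch silently overwrites the already-accumulated group, an
-- accidental collision of the id column with date grouping, while B merges the group (both
-- defensible on that unspecified corner) — and (b) inputs where a column is longer than the first
-- column of its date-prefix group, on which A (and B alike) raise IndexError.
def Pre_merge_date_columns (data : List (String × List Int)) : Prop :=
  List.Pairwise (fun a b => b.1 = "student" → pvTag a.1 ≠ "student") data ∧
  (∀ i j : Fin data.length, i.val < j.val →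
     pvTag (data.get i).1 = pvTag (data.get j).1 →
     (∀ m : Fin data.length, m.val < i.val → pvTag (data.get m).1 ≠ pvTag (data.get i).1) →
     (data.get j).2.length ≤ (data.get i).2.length)

instance (data : List (String × List Int)) : Decidable (Pre_merge_date_columns data) := by
  unfold Pre_merge_date_columns; infer_instance

def pvWitness_merge_date_columns : (List (String × List Int)) :=
  [("student", [1]), ("a/1", [2, 3]), ("a/2", [4, 5])]

def Spec_merge_date_columns (data : List (String × List Int)) (out : List (String × List Int)) : Prop := out = merge_date_columns_alt data
instance (data : List (String × List Int)) (out : List (String × List Int)) : Decidable (Spec_merge_date_columns data out) := by unfold Spec_merge_date_columns; infer_instance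

-- ===== CLAIM (what is proved, stated in full; the proofs are below) =====
def Claim_equal_merge_date_columns : Prop := ∀ (data : List (String × List Int)), Dom_merge_date_columns data → Pre_merge_date_columns data → Spec_merge_date_columns data (merge_date_columns data)

-- ===== LEMMAS AND PROOFS =====

-- the elementwise loop `for index, cell in enumerate(col): m[index] += cell`
def pvAddCol (m col : List Int) : List Int :=
  (PySem.List.enumerate col).foldl (fun xs ic => xs.set ic.1.toNat (xs.getD ic.1.toNat 0 + ic.2)) m

-- merging one group of keys, looking the columns up in d
def pvMergeG (d : PySem.Dict String (List Int)) (ks : List String) : List Int :=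
  ks.tail.foldl (fun m k => pvAddCol m (d.getD k [])) (d.getD (ks.headD "") [])

-- the common normal form both results are reduced to: one entry per first-appearance date prefix,
-- carrying the merge of all columns of that prefix in input order
def pvNF (d : PySem.Dict String (List Int)) (l : List (String × List Int)) : List (String × List Int) :=
  (PySem.Set.ofList (l.map (fun kv => pvTag kv.1))).map
    (fun t => (t, pvMergeG d ((l.filter (fun kv => pvTag kv.1 == t)).map (·.1))))

theorem pvMergeG_append (d : PySem.Dict String (List Int)) (ks : List String) (k : String)
    (h : ks ≠ []) : pvMergeG d (ks ++ [k]) = pvAddCol (pvMergeG d ks) (d.getD k []) := by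
  cases ks with
  | nil => exact absurd rfl h
  | cons a t => simp [pvMergeG, List.foldl_append]

theorem pvNF_keys (d : PySem.Dict String (List Int)) (l : List (String × List Int)) :
    (pvNF d l).map (·.1) = PySem.Set.ofList (l.map (fun kv => pvTag kv.1)) := by
  rw [pvNF, List.map_map]
  simp [Function.comp_def]

theorem pvGroups_keys (l : List (String × List Int)) :
    (l.foldl (fun g kv => g.modify (pvTag kv.1) [] (fun ks => ks ++ [kv.1]))
        (PySem.Dict.empty : PySem.Dict String (List String))).keys
      = PySem.Set.ofList (l.map (fun kv => pvTag kv.1)) := by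
  rw [PySem.Dict.keys_foldl_modify_key l (fun kv => pvTag kv.1) [] (fun _ kv => fun ks => ks ++ [kv.1])]
  rw [PySem.Dict.keys_empty, PySem.Set.update_nil_left]

theorem pvGroups_nodup (l : List (String × List Int)) :
    (l.foldl (fun g kv => g.modify (pvTag kv.1) [] (fun ks => ks ++ [kv.1]))
        (PySem.Dict.empty : PySem.Dict String (List String))).keys.Nodup := by
  apply PySem.Dict.nodup_keys_foldl_modify_key l (fun kv => pvTag kv.1) [] (fun _ kv => fun ks => ks ++ [kv.1])
  simp [PySem.Dict.keys_empty]

theorem pvGroups_getD (l : List (String × List Int)) (t : String) :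
    (l.foldl (fun g kv => g.modify (pvTag kv.1) [] (fun ks => ks ++ [kv.1]))
        (PySem.Dict.empty : PySem.Dict String (List String))).getD t []
      = (l.filter (fun kv => pvTag kv.1 == t)).map (·.1) := by
  have h1 : (l.foldl (fun g kv => g.modify (pvTag kv.1) [] (fun ks => ks ++ [kv.1]))
      (PySem.Dict.empty : PySem.Dict String (List String)))
      = (l.map (fun kv => (pvTag kv.1, kv.1))).foldl
          (fun g p => g.modify p.1 [] (fun ks => ks ++ [p.2])) PySem.Dict.empty := by
    rw [List.foldl_map]
  rw [h1, PySem.Dict.getD_foldl_modify_append]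
  simp [List.filter_map, Function.comp_def]

theorem pvB_main (d : PySem.Dict String (List Int)) (l : List (String × List Int)) :
    ((((l.foldl (fun g kv => g.modify (pvTag kv.1) [] (fun ks => ks ++ [kv.1]))
        PySem.Dict.empty)).items.foldl
      (fun result tks =>
        result.insert tks.1
          (tks.2.tail.foldl
            (fun m key =>
              (PySem.List.enumerate (d.getD key [])).foldl
                (fun m ic => m.set ic.1.toNat (m.getD ic.1.toNat 0 + ic.2)) m)
            (d.getD (tks.2.headD "") [])))
      PySem.Dict.empty).items) = pvNF d l := by
  set G := (l.foldl (fun g kv => g.modify (pvTag kv.1) [] (fun ks => ks ++ [kv.1]))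
      (PySem.Dict.empty : PySem.Dict String (List String))) with hG
  rw [PySem.Dict.items_foldl_insert_fresh G.items (fun tks => tks.1)
        (fun tks => (tks.2.tail.foldl
            (fun m key =>
              (PySem.List.enumerate (d.getD key [])).foldl
                (fun m ic => m.set ic.1.toNat (m.getD ic.1.toNat 0 + ic.2)) m)
            (d.getD (tks.2.headD "") []))) PySem.Dict.empty
        (by intro a _; simp [PySem.Dict.contains_empty])
        (by
          have : G.items.map (fun tks => tks.1) = G.keys := rfl
          rw [this]; exact pvGroups_nodup l)]
  rw [PySem.Dict.items_eq_map_keys G (pvGroups_nodup l) []]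
  show [] ++ _ = _
  rw [List.nil_append, List.map_map, pvGroups_keys, pvNF]
  apply List.map_congr_left
  intro t _
  simp only [Function.comp]
  rw [pvGroups_getD l t]
  rfl

theorem pvA_main (d : PySem.Dict String (List Int)) (l : List (String × List Int))
    (h : List.Pairwise (fun a b => b.1 = "student" → pvTag a.1 ≠ "student") l) :
    (l.foldl (pvStepA d) PySem.Dict.empty).items = pvNF d l := by
  induction l using List.reverseRecOn with
  | nil => simp [pvNF, PySem.Set.ofList]; rfl
  | append_singleton l kv ih =>
    obtain ⟨hl, -, hcross⟩ := List.pairwise_append.mp h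
    have ih' := ih hl
    rw [List.foldl_append, List.foldl_cons, List.foldl_nil]
    have hkeys : (l.foldl (pvStepA d) PySem.Dict.empty).keys
        = PySem.Set.ofList (l.map (fun kv => pvTag kv.1)) := by
      have : (l.foldl (pvStepA d) PySem.Dict.empty).keys
          = ((l.foldl (pvStepA d) PySem.Dict.empty).items).map (·.1) := rfl
      rw [this, ih', pvNF_keys]
    have hnodup : (l.foldl (pvStepA d) PySem.Dict.empty).keys.Nodup := by
      rw [hkeys]; exact PySem.Set.nodup_ofList _
    set t0 := pvTag kv.1 with ht0
    have hcontains : (l.foldl (pvStepA d) PySem.Dict.empty).contains t0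
        = decide (t0 ∈ PySem.Set.ofList (l.map (fun kv => pvTag kv.1))) := by
      rw [PySem.Dict.contains_eq_decide_mem_keys, hkeys]
    by_cases hmem : t0 ∈ PySem.Set.ofList (l.map (fun kv => pvTag kv.1))
    · -- the date is already a key of result
      have hkvne : kv.1 ≠ "student" := by
        intro hkv
        obtain ⟨a, ha, hta⟩ := List.mem_map.mp ((PySem.Set.mem_ofList _ _).mp hmem)
        refine (hcross a ha kv (List.mem_singleton.mpr rfl) hkv) ?_
        rw [hta, ht0, hkv]
        decide
      have hbeq : (kv.1 == "student") = false := by simp [hkvne]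
      have hcon : (l.foldl (pvStepA d) PySem.Dict.empty).contains t0 = true := by
        rw [hcontains]; simp [hmem]
      have hmemitem : (t0, pvMergeG d ((l.filter (fun kv => pvTag kv.1 == t0)).map (·.1)))
          ∈ (l.foldl (pvStepA d) PySem.Dict.empty).items := by
        rw [ih']
        exact List.mem_map.mpr ⟨t0, hmem, rfl⟩
      have hgetD : (l.foldl (pvStepA d) PySem.Dict.empty).getD t0 []
          = pvMergeG d ((l.filter (fun kv => pvTag kv.1 == t0)).map (·.1)) :=
        PySem.Dict.getD_of_mem_items _ hmemitem hnodup []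
      have hfne : ((l.filter (fun kv => pvTag kv.1 == t0)).map (·.1)) ≠ [] := by
        obtain ⟨a, ha, hta⟩ := List.mem_map.mp ((PySem.Set.mem_ofList _ _).mp hmem)
        simp only [ne_eq, List.map_eq_nil_iff, List.filter_eq_nil_iff]
        intro hall
        exact hall a ha (by simp [hta])
      show (pvStepA d (l.foldl (pvStepA d) PySem.Dict.empty) kv).items = _
      rw [pvStepA]
      simp only [hbeq, Bool.false_eq_true, if_false, ← ht0, hcon, if_true]
      rw [PySem.Dict.items_insert_of_contains _ _ hcon, ih', hgetD]
      have hms : (List.map (fun kv => pvTag kv.1) [kv]) = [t0] := by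
        rw [ht0]; simp
      rw [pvNF, pvNF, List.map_map, List.map_append, hms]
      rw [PySem.Set.ofList_append_singleton, PySem.Set.add_of_mem hmem]
      apply List.map_congr_left
      intro t htmem
      by_cases hteq : t = t0
      · rw [hteq]
        simp only [Function.comp_apply, beq_self_eq_true, if_true]
        rw [List.filter_append]
        have : List.filter (fun kv => pvTag kv.1 == t0) [kv] = [kv] := by
          simp [← ht0]
        rw [this, List.map_append]
        simp only [List.map_cons, List.map_nil]
        rw [pvMergeG_append d _ kv.1 hfne]
        rfl
      · have : (t == t0) = false := by simp [hteq]
        simp only [Function.comp_apply, this, Bool.false_eq_true, if_false]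
        rw [List.filter_append]
        have : List.filter (fun kv => pvTag kv.1 == t) [kv] = [] := by
          simp [← ht0]; exact fun hc => absurd hc.symm hteq
        rw [this, List.append_nil]
    · -- the date is fresh
      have hcon : (l.foldl (pvStepA d) PySem.Dict.empty).contains t0 = false := by
        rw [hcontains]; simp [hmem]
      have hfilnil : List.filter (fun kv => pvTag kv.1 == t0) l = [] := by
        rw [List.filter_eq_nil_iff]
        intro a ha hc
        exact hmem ((PySem.Set.mem_ofList _ _).mpr (List.mem_map.mpr ⟨a, ha, by simpa using hc⟩))
      have hrhs : pvNF d (l ++ [kv]) = pvNF d l ++ [(t0, d.getD kv.1 [])] := by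
        have hms : (List.map (fun kv => pvTag kv.1) [kv]) = [t0] := by
          rw [ht0]; simp
        rw [pvNF, pvNF, List.map_append, hms, PySem.Set.ofList_append_singleton,
            PySem.Set.add_of_not_mem hmem, List.map_append]
        congr 1
        · apply List.map_congr_left
          intro t htmem
          have htne : t ≠ t0 := fun hc => hmem (hc ▸ htmem)
          rw [List.filter_append]
          have : List.filter (fun kv => pvTag kv.1 == t) [kv] = [] := by
            simp [← ht0]; exact fun hc => absurd hc.symm htne
          rw [this, List.append_nil]
        · simp only [List.map_cons, List.map_nil, List.filter_append, hfilnil]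
          have : List.filter (fun kv => pvTag kv.1 == t0) [kv] = [kv] := by simp [← ht0]
          rw [List.nil_append, this]
          simp [pvMergeG]
      rw [hrhs, ← ih']
      show (pvStepA d (l.foldl (pvStepA d) PySem.Dict.empty) kv).items = _
      rw [pvStepA]
      by_cases hstud : kv.1 = "student"
      · have ht0s : t0 = "student" := by rw [ht0, hstud]; decide
        simp only [hstud, beq_self_eq_true, if_true]
        rw [PySem.Dict.items_insert_of_not_contains _ _ (by rw [← ht0s]; exact hcon)]
        simp [ht0s]
      · have hbeq : (kv.1 == "student") = false := by simp [hstud]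
        simp only [hbeq, Bool.false_eq_true, if_false, ← ht0, hcon]
        rw [PySem.Dict.items_insert_of_not_contains _ _ hcon]

-- ===== VERDICT (by name: the statement is the Claim_ definition above) =====
theorem merge_date_columns_spec : Claim_equal_merge_date_columns := by
  intro data _hdom hpre
  unfold Spec_merge_date_columns merge_date_columns merge_date_columns_alt
  rw [pvA_main (PySem.Dict.mk data) data hpre.1, pvB_main (PySem.Dict.mk data) data]
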